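-- pv_equiv track=rewrite | github.com/harshil0404/pythonAlgos | AMAZON_clusterStoresOpening.py | makeClstr
-- ===== SOURCE A (Python) =====
-- def makeClstr(r,c,g,tf):
--     clstr = []
--     for i in range(r):
--         cl = []
--         for j in range(c):
--             if tf == True :
--                 if(g[i][j]==1):
--                     cl.append([i,j])
--                 else:
--                     if(cl):
--                         clstr.append(cl)
--                         cl = []
--             elif tf == False :
--                 if(g[j][i] == 1):
--                     cl.append([j,i])
--                 else:
--                     if(cl):
--                         clstr.append(cl)
--                         cl = []
--         if(cl):
--             clstr.append(cl)
--     return clstr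
-- ===== SOURCE B (Python) =====
-- def makeClstr(r, c, g, tf):
--     # Run-extraction strategy: pick the orientation once, then for each line
--     # scan for maximal runs of 1s and emit each run as one cluster.
--     if tf == True:
--         cell = lambda i, j: g[i][j]
--         coord = lambda i, j: [i, j]
--     elif tf == False:
--         cell = lambda i, j: g[j][i]
--         coord = lambda i, j: [j, i]
--     else:
--         return []
--     out = []
--     for i in range(r):
--         j = 0
--         while j < c:
--             if cell(i, j) == 1:
--                 k = j
--                 while k < c and cell(i, k) == 1:
--                     k += 1
--                 out.append([coord(i, t) for t in range(j, k)])
--                 j = k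
--             else:
--                 j += 1
--     return out
-- ===== Notes on version B (the rewrite author's own statement) =====
-- stated objective: alternative
-- what changed: Replaces A's per-cell sentinel-accumulator with flush logic by a one-time orientation dispatch plus a run-extraction scan that finds each maximal run of 1s and emits it as a whole cluster.
import Mathlib
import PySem

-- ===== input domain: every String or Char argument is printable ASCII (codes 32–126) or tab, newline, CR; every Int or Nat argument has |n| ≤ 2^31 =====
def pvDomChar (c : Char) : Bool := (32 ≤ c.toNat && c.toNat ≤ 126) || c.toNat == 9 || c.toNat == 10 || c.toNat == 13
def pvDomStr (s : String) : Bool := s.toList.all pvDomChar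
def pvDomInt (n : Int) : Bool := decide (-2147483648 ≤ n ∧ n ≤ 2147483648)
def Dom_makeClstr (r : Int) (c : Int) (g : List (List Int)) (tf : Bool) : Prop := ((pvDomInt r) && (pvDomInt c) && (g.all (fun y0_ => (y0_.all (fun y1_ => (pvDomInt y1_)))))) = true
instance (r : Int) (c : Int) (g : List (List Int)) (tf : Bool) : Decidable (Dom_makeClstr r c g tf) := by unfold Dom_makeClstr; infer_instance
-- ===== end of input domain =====

-- B replaces A's per-cell sentinel-accumulator/flush logic by a one-time orientation
-- dispatch plus a run-extraction scan emitting each maximal run of 1s as one cluster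
-- (objective: alternative; same asymptotic cost).

-- ===== PORT A =====
-- g[i][j] under Pre_ (indices in range); total form with defaults, exact on Pre_.
def pvCell (g : List (List Int)) (i j : Int) : Int :=
  PySem.List.pyGetD (PySem.List.pyGetD g i []) j 0

def makeClstr (r : Int) (c : Int) (g : List (List Int)) (tf : Bool) : List (List (List Int)) :=
  (PySem.List.pyRange 0 r 1).foldl (fun clstr i =>
    let st := (PySem.List.pyRange 0 c 1).foldl
      (fun (st : List (List (List Int)) × List (List Int)) j =>
        if tf = true then
          if pvCell g i j = 1 then (st.1, st.2 ++ [[i, j]])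
          else if st.2 ≠ [] then (st.1 ++ [st.2], ([] : List (List Int))) else st
        else if tf = false then
          if pvCell g j i = 1 then (st.1, st.2 ++ [[j, i]])
          else if st.2 ≠ [] then (st.1 ++ [st.2], ([] : List (List Int))) else st
        else st)
      (clstr, ([] : List (List Int)))
    if st.2 ≠ [] then st.1 ++ [st.2] else st.1) []

-- ===== PORT B =====
-- inner 'while k < c and cell(i,k) == 1' loop of Source B: split off the maximal run of 1s
def pvTakeRun (cell : Int → Int) : List Int → List Int × List Int
  | [] => ([], [])
  | j :: rest =>
    if cell j = 1 then
      let pr := pvTakeRun cell rest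
      (j :: pr.1, pr.2)
    else ([], j :: rest)

-- needed for pvScan's termination
theorem pvTakeRun_len_le (cell : Int → Int) (l : List Int) :
    (pvTakeRun cell l).2.length ≤ l.length := by
  induction l with
  | nil => simp [pvTakeRun]
  | cons j rest ih =>
    simp only [pvTakeRun]
    split
    · simpa using Nat.le_succ_of_le ih
    · simp

-- outer 'while j < c' loop of Source B: scan the indices, emit each run as a cluster
def pvScan (cell : Int → Int) (coord : Int → List Int) : List Int → List (List (List Int))
  | [] => []
  | j :: rest =>
    if cell j = 1 then
      let pr := pvTakeRun cell rest
      ((j :: pr.1).map coord) :: pvScan cell coord pr.2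
    else pvScan cell coord rest
termination_by l => l.length
decreasing_by
  · exact Nat.lt_succ_of_le (pvTakeRun_len_le cell rest)
  · simp

def makeClstr_alt (r : Int) (c : Int) (g : List (List Int)) (tf : Bool) : List (List (List Int)) :=
  let cell : Int → Int → Int := if tf then fun i j => pvCell g i j else fun i j => pvCell g j i
  let coord : Int → Int → List Int := if tf then fun i j => [i, j] else fun i j => [j, i]
  (PySem.List.pyRange 0 r 1).foldl
    (fun out i => out ++ pvScan (cell i) (coord i) (PySem.List.pyRange 0 c 1)) []

-- ===== PRECONDITION & SPEC =====
-- Pre_ = exactly the inputs where Python A raises no IndexError: every accessed cell exists.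
def Pre_makeClstr (r : Int) (c : Int) (g : List (List Int)) (tf : Bool) : Prop :=
  0 < r → 0 < c →
    if tf then r ≤ g.length ∧ ∀ row ∈ g.take r.toNat, c ≤ row.length
    else c ≤ g.length ∧ ∀ row ∈ g.take c.toNat, r ≤ row.length
instance (r : Int) (c : Int) (g : List (List Int)) (tf : Bool) : Decidable (Pre_makeClstr r c g tf) := by
  unfold Pre_makeClstr; infer_instance

def pvWitness_makeClstr : Int × Int × List (List Int) × Bool := (2, 3, [[1, 1, 0], [0, 1, 1]], true)

def Spec_makeClstr (r : Int) (c : Int) (g : List (List Int)) (tf : Bool) (out : List (List (List Int))) : Prop := out = makeClstr_alt r c g tf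
instance (r : Int) (c : Int) (g : List (List Int)) (tf : Bool) (out : List (List (List Int))) : Decidable (Spec_makeClstr r c g tf out) := by unfold Spec_makeClstr; infer_instance

-- ===== CLAIM (what is proved, stated in full; the proofs are below) =====
def Claim_equal_makeClstr : Prop := ∀ (r : Int) (c : Int) (g : List (List Int)) (tf : Bool), Dom_makeClstr r c g tf → Pre_makeClstr r c g tf → Spec_makeClstr r c g tf (makeClstr r c g tf)

-- ===== LEMMAS AND PROOFS =====

-- A's inner-loop step for a fixed orientation
def pvStep (cell : Int → Int) (coord : Int → List Int)
    (st : List (List (List Int)) × List (List Int)) (j : Int) :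
    List (List (List Int)) × List (List Int) :=
  if cell j = 1 then (st.1, st.2 ++ [coord j])
  else if st.2 ≠ [] then (st.1 ++ [st.2], []) else st

-- invariant: A's flushed row fold = emitted clusters so far ++ the run scan of the rest
theorem pvFold_eq (cell : Int → Int) (coord : Int → List Int) :
    ∀ (l : List Int) (cs : List (List (List Int))) (cl : List (List Int)),
    (let st := l.foldl (pvStep cell coord) (cs, cl)
     if st.2 ≠ [] then st.1 ++ [st.2] else st.1)
    = cs ++ (if cl = [] then pvScan cell coord l
             else (cl ++ (pvTakeRun cell l).1.map coord) :: pvScan cell coord (pvTakeRun cell l).2) := by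
  intro l
  induction l with
  | nil =>
    intro cs cl
    by_cases h : cl = [] <;> simp [h, pvTakeRun, pvScan]
  | cons j rest ih =>
    intro cs cl
    simp only [List.foldl_cons]
    by_cases hc : cell j = 1
    · have hstep : pvStep cell coord (cs, cl) j = (cs, cl ++ [coord j]) := by
        simp [pvStep, hc]
      rw [hstep, ih]
      have hne : cl ++ [coord j] ≠ [] := by simp
      by_cases h : cl = []
      · simp [h, pvScan, hc]
      · simp [h, hne, pvTakeRun, hc]
    · by_cases h : cl = []
      · have hstep : pvStep cell coord (cs, cl) j = (cs, cl) := by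
          simp [pvStep, hc, h]
        rw [hstep, ih]
        simp [h, pvScan, hc]
      · have hstep : pvStep cell coord (cs, cl) j = (cs ++ [cl], []) := by
          simp [pvStep, hc, h]
        rw [hstep, ih]
        simp [h, pvScan, pvTakeRun, hc]

-- ===== VERDICT (by name: the statement is the Claim_ definition above) =====
theorem makeClstr_spec : Claim_equal_makeClstr := by
  intro r c g tf _ _
  unfold Spec_makeClstr makeClstr makeClstr_alt
  cases tf
  · simp only [Bool.false_eq_true, if_false, if_true]
    congr 1
    funext out i
    have hf : (fun (st : List (List (List Int)) × List (List Int)) (j : Int) =>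
          if pvCell g j i = 1 then (st.1, st.2 ++ [[j, i]])
          else if st.2 ≠ [] then (st.1 ++ [st.2], ([] : List (List Int))) else st)
        = pvStep (fun j => pvCell g j i) (fun j => [j, i]) := by
      funext st j; simp [pvStep]
    rw [hf]
    have h := pvFold_eq (fun j => pvCell g j i) (fun j => [j, i]) (PySem.List.pyRange 0 c 1) out []
    simpa using h
  · simp only [if_true]
    congr 1
    funext out i
    have hf : (fun (st : List (List (List Int)) × List (List Int)) (j : Int) =>
          if pvCell g i j = 1 then (st.1, st.2 ++ [[i, j]])
          else if st.2 ≠ [] then (st.1 ++ [st.2], ([] : List (List Int))) else st)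
        = pvStep (fun j => pvCell g i j) (fun j => [i, j]) := by
      funext st j; simp [pvStep]
    rw [hf]
    have h := pvFold_eq (fun j => pvCell g i j) (fun j => [i, j]) (PySem.List.pyRange 0 c 1) out []
    simpa using h
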